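-- pv_equiv track=rewrite | github.com/DaniloZZZ/NNoGANo | Generate_Rap.py | split_for_tokens
-- ===== SOURCE A (Python) =====
-- def split_for_tokens(text):
--     splited = []
--     number = ''
--     word = ''
--     other = ''
--     for i in range(len(text)):
--         if text[i].isdigit():
--             if len(other) > 0:
--                 splited += [other]
--                 other = ''
--             if len(word) > 0:
--                 splited += [word]
--                 word = ''
--             number += text[i]
--         elif text[i].isalpha():
--             if len(other) > 0:
--                 splited += [other]
--                 other = ''
--             if len(number) > 0:
--                 splited += [number]
--                 number = ''
--             word += text[i]
--         else:
--             if len(word) > 0: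
--                 splited += [word]
--                 word = ''
--             if len(number) > 0:
--                 splited += [number]
--                 number = ''
--             other += text[i]
--     if len(word) > 0:
--         splited += [word]
--     if len(number) > 0:
--         splited += [number]
--     if len(other) > 0:
--         splited += [other]
--     return splited
-- ===== SOURCE B (Python) =====
-- def split_for_tokens(text):
--     out = []
--     run = ''
--     key = None
--     for c in text:
--         k = 0 if c.isdigit() else 1 if c.isalpha() else 2
--         if run and k != key:
--             out.append(run)
--             run = ''
--         run += c
--         key = k
--     if run:
--         out.append(run)
--     return out
-- ===== Notes on version B (the rewrite author's own statement) =====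
-- stated objective: simpler
-- what changed: Replaced A's three per-class accumulators (number/word/other) with their six flush-on-change branches by a single run buffer plus the class key of its last character, flushing exactly when the class changes; fewer branches and string flushes per character.
import Mathlib
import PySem

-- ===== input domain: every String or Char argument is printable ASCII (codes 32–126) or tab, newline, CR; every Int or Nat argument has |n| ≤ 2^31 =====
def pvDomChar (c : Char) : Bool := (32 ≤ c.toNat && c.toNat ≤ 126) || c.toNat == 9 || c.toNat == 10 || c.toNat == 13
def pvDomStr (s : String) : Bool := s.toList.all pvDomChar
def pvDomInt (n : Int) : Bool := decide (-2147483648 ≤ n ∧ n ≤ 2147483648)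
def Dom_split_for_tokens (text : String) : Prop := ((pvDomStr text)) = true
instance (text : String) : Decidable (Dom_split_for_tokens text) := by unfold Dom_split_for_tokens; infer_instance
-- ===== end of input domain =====

-- B replaces A's three per-class accumulators and flush branches by one run buffer
-- keyed by the class of its last character (simpler decomposition, same O(n) cost).

-- ===== PORT A =====
def stepA (st : List String × List Char × List Char × List Char) (c : Char) :
    List String × List Char × List Char × List Char :=
  let (sp, num, word, oth) := st
  if PySem.Chars.isdigit c then
    let sp := if oth.length > 0 then sp ++ [String.ofList oth] else sp
    let oth := if oth.length > 0 then ([] : List Char) else oth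
    let sp := if word.length > 0 then sp ++ [String.ofList word] else sp
    let word := if word.length > 0 then ([] : List Char) else word
    (sp, num ++ [c], word, oth)
  else if PySem.Chars.isalpha c then
    let sp := if oth.length > 0 then sp ++ [String.ofList oth] else sp
    let oth := if oth.length > 0 then ([] : List Char) else oth
    let sp := if num.length > 0 then sp ++ [String.ofList num] else sp
    let num := if num.length > 0 then ([] : List Char) else num
    (sp, num, word ++ [c], oth)
  else
    let sp := if word.length > 0 then sp ++ [String.ofList word] else sp
    let word := if word.length > 0 then ([] : List Char) else word
    let sp := if num.length > 0 then sp ++ [String.ofList num] else sp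
    let num := if num.length > 0 then ([] : List Char) else num
    (sp, num, word, oth ++ [c])

def split_for_tokens (text : String) : List String :=
  let st := text.toList.foldl stepA ([], [], [], [])
  let (sp, num, word, oth) := st
  let sp := if word.length > 0 then sp ++ [String.ofList word] else sp
  let sp := if num.length > 0 then sp ++ [String.ofList num] else sp
  let sp := if oth.length > 0 then sp ++ [String.ofList oth] else sp
  sp

-- ===== PORT B =====
def classifyB (c : Char) : Nat :=
  if PySem.Chars.isdigit c then 0 else if PySem.Chars.isalpha c then 1 else 2

def stepB (st : List String × List Char × Option Nat) (c : Char) :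
    List String × List Char × Option Nat :=
  let (out, run, key) := st
  let k := classifyB c
  let (out, run) :=
    if !run.isEmpty && key != some k then (out ++ [String.ofList run], ([] : List Char))
    else (out, run)
  (out, run ++ [c], some k)

def split_for_tokens_alt (text : String) : List String :=
  let st := text.toList.foldl stepB ([], [], none)
  let (out, run, _) := st
  if !run.isEmpty then out ++ [String.ofList run] else out

-- ===== PRECONDITION & SPEC =====
def Spec_split_for_tokens (text : String) (out : List String) : Prop := out = split_for_tokens_alt text
instance (text : String) (out : List String) : Decidable (Spec_split_for_tokens text out) := by unfold Spec_split_for_tokens; infer_instance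

-- ===== CLAIM (what is proved, stated in full; the proofs are below) =====
def Claim_equal_split_for_tokens : Prop := ∀ (text : String), Dom_split_for_tokens text → Spec_split_for_tokens text (split_for_tokens text)

-- ===== LEMMAS AND PROOFS =====

/-- Coupling invariant: A's three accumulators hold at most one nonempty run,
    which is exactly B's run buffer, with B's key naming which slot it is. -/
def RelAB (a : List String × List Char × List Char × List Char)
    (b : List String × List Char × Option Nat) : Prop :=
  a.1 = b.1 ∧
  ((b.2.2 = none ∧ a.2.1 = [] ∧ a.2.2.1 = [] ∧ a.2.2.2 = [] ∧ b.2.1 = []) ∨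
   (b.2.1 ≠ [] ∧
     ((b.2.2 = some 0 ∧ a.2.1 = b.2.1 ∧ a.2.2.1 = [] ∧ a.2.2.2 = []) ∨
      (b.2.2 = some 1 ∧ a.2.2.1 = b.2.1 ∧ a.2.1 = [] ∧ a.2.2.2 = []) ∨
      (b.2.2 = some 2 ∧ a.2.2.2 = b.2.1 ∧ a.2.1 = [] ∧ a.2.2.1 = []))))

theorem rel_step (a : List String × List Char × List Char × List Char)
    (b : List String × List Char × Option Nat) (c : Char) (h : RelAB a b) :
    RelAB (stepA a c) (stepB b c) := by
  obtain ⟨sp, num, word, oth⟩ := a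
  obtain ⟨out, run, key⟩ := b
  obtain ⟨h1, h2⟩ := h
  simp only at h1
  by_cases hd : PySem.Chars.isdigit c <;> by_cases ha : PySem.Chars.isalpha c <;>
    rcases h2 with ⟨hk, h3, h4, h5, h6⟩ | ⟨hr, ⟨hk, h3, h4, h5⟩ | ⟨hk, h3, h4, h5⟩ | ⟨hk, h3, h4, h5⟩⟩ <;>
    simp_all [RelAB, stepA, stepB, classifyB]

theorem rel_fold (l : List Char) (a : List String × List Char × List Char × List Char)
    (b : List String × List Char × Option Nat) (h : RelAB a b) :
    RelAB (l.foldl stepA a) (l.foldl stepB b) := by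
  induction l generalizing a b with
  | nil => exact h
  | cons c l ih => exact ih _ _ (rel_step a b c h)

-- ===== VERDICT (by name: the statement is the Claim_ definition above) =====
theorem split_for_tokens_spec : Claim_equal_split_for_tokens := by
  intro text _
  unfold Spec_split_for_tokens split_for_tokens split_for_tokens_alt
  have h := rel_fold text.toList ([], [], [], []) ([], [], none) (by simp [RelAB])
  generalize List.foldl stepA ([], [], [], []) text.toList = pa at h ⊢
  generalize List.foldl stepB ([], [], none) text.toList = pb at h ⊢
  obtain ⟨sp, num, word, oth⟩ := pa
  obtain ⟨out, run, key⟩ := pb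
  obtain ⟨h1, h2⟩ := h
  simp only at h1 h2 ⊢
  rcases h2 with ⟨hk, h3, h4, h5, h6⟩ | ⟨hr, ⟨hk, h3, h4, h5⟩ | ⟨hk, h3, h4, h5⟩ | ⟨hk, h3, h4, h5⟩⟩ <;>
    simp_all [List.length_pos_iff, List.isEmpty_eq_false_iff]
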